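-- pv_equiv track=rewrite | github.com/ibsalameh95/DL_OSCC_Prognosis | prognosis_model/dataset_preperation/tiles_operations.py | get_xywh
-- ===== SOURCE A (Python) =====
-- def get_xywh(coordinates, downsample):
--     x_values = [downsample * point[0] for point in coordinates]
--     y_values = [downsample * point[1] for point in coordinates]
--
--     x = min(x_values)
--     y = min(y_values)
--     width = max(x_values) - x
--     height = max(y_values) - y
--
--     return x, y, width, height
-- ===== SOURCE B (Python) =====
-- def get_xywh(coordinates, downsample):
--     it = iter(coordinates)
--     px, py = next(it)
--     min_x = max_x = downsample * px
--     min_y = max_y = downsample * py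
--     for px, py in it:
--         sx = downsample * px
--         sy = downsample * py
--         if sx < min_x:
--             min_x = sx
--         if sx > max_x:
--             max_x = sx
--         if sy < min_y:
--             min_y = sy
--         if sy > max_y:
--             max_y = sy
--     return min_x, min_y, max_x - min_x, max_y - min_y
-- ===== Notes on version B (the rewrite author's own statement) =====
-- stated objective: alternative
-- what changed: Replaces the two intermediate scaled-coordinate lists and four separate min/max scans with a single fused pass that maintains the four extremes in accumulators (O(1) extra space instead of two temporary lists).
import Mathlib
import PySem

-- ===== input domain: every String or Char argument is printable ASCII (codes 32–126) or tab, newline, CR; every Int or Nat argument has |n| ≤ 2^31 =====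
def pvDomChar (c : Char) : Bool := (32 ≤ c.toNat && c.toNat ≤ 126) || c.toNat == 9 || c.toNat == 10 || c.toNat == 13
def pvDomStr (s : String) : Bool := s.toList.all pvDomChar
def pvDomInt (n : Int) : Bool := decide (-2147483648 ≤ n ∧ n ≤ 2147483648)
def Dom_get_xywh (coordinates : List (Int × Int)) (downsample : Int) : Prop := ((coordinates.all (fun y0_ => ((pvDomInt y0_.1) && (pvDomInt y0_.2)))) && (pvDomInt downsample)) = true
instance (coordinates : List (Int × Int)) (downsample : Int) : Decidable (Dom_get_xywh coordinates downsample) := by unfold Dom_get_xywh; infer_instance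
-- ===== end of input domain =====

-- B fuses A's two list comprehensions and four min/max scans into one single pass over
-- the coordinates maintaining the four extremes in accumulators (O(1) extra space).


-- ===== PORT A =====
-- min([]) / max([]) raise ValueError in Python; PySem.List.min?/max? return none there,
-- and those inputs are excluded by Pre_get_xywh (the fallback arm is unreachable on Pre_).
def get_xywh (coordinates : List (Int × Int)) (downsample : Int) : Int × Int × Int × Int :=
  let x_values := coordinates.map (fun point => downsample * point.1)
  let y_values := coordinates.map (fun point => downsample * point.2)
  match PySem.List.min? x_values (fun v => v), PySem.List.min? y_values (fun v => v),
        PySem.List.max? x_values (fun v => v), PySem.List.max? y_values (fun v => v) with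
  | some x, some y, some mx, some my => (x, y, mx - x, my - y)
  | _, _, _, _ => (0, 0, 0, 0)

-- ===== PORT B =====
-- the single-pass loop of Source B: four extreme accumulators updated per point
def get_xywh_alt_go (downsample : Int) (rest : List (Int × Int))
    (min_x min_y max_x max_y : Int) : Int × Int × Int × Int :=
  match rest with
  | [] => (min_x, min_y, max_x - min_x, max_y - min_y)
  | (px, py) :: t =>
      let sx := downsample * px
      let sy := downsample * py
      get_xywh_alt_go downsample t
        (if sx < min_x then sx else min_x)
        (if sy < min_y then sy else min_y)
        (if sx > max_x then sx else max_x)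
        (if sy > max_y then sy else max_y)

def get_xywh_alt (coordinates : List (Int × Int)) (downsample : Int) : Int × Int × Int × Int :=
  match coordinates with
  | [] => (0, 0, 0, 0)   -- unreachable under Pre_ (Source B raises StopIteration here, like A's ValueError)
  | (px, py) :: t =>
      get_xywh_alt_go downsample t (downsample * px) (downsample * py)
        (downsample * px) (downsample * py)

-- ===== PRECONDITION & SPEC =====
-- Pre_ excludes only the empty list, on which Python A raises ValueError (min of empty sequence).
def Pre_get_xywh (coordinates : List (Int × Int)) (_downsample : Int) : Prop := coordinates ≠ []
instance (coordinates : List (Int × Int)) (downsample : Int) : Decidable (Pre_get_xywh coordinates downsample) := by unfold Pre_get_xywh; infer_instance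
def pvWitness_get_xywh : (List (Int × Int)) × Int := ([(1, 2), (-3, 4)], 2)

def Spec_get_xywh (coordinates : List (Int × Int)) (downsample : Int) (out : Int × Int × Int × Int) : Prop := out = get_xywh_alt coordinates downsample
instance (coordinates : List (Int × Int)) (downsample : Int) (out : Int × Int × Int × Int) : Decidable (Spec_get_xywh coordinates downsample out) := by unfold Spec_get_xywh; infer_instance

-- ===== CLAIM (what is proved, stated in full; the proofs are below) =====
def Claim_equal_get_xywh : Prop := ∀ (coordinates : List (Int × Int)) (downsample : Int), Dom_get_xywh coordinates downsample → Pre_get_xywh coordinates downsample → Spec_get_xywh coordinates downsample (get_xywh coordinates downsample)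

-- ===== LEMMAS AND PROOFS =====

theorem if_lt_eq_min (a b : Int) : (if b < a then b else a) = min a b := by
  rcases le_or_gt a b with h | h
  · simp [min_eq_left h]; omega
  · simp [min_eq_right h.le, h]

theorem if_gt_eq_max (a b : Int) : (if b > a then b else a) = max a b := by
  rcases le_or_gt b a with h | h
  · simp [max_eq_left h]; omega
  · simp [max_eq_right h.le, h]

-- the fused loop computes the four folds of A's separate scans
theorem go_eq (downsample : Int) (t : List (Int × Int)) :
    ∀ (mnx mny mxx mxy : Int),
      get_xywh_alt_go downsample t mnx mny mxx mxy =
        ((t.map (fun p => downsample * p.1)).foldl min mnx,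
         (t.map (fun p => downsample * p.2)).foldl min mny,
         (t.map (fun p => downsample * p.1)).foldl max mxx - (t.map (fun p => downsample * p.1)).foldl min mnx,
         (t.map (fun p => downsample * p.2)).foldl max mxy - (t.map (fun p => downsample * p.2)).foldl min mny) := by
  induction t with
  | nil => intro mnx mny mxx mxy; simp [get_xywh_alt_go]
  | cons h t ih =>
      intro mnx mny mxx mxy
      obtain ⟨px, py⟩ := h
      simp only [get_xywh_alt_go, List.map_cons, List.foldl_cons]
      rw [ih, if_lt_eq_min, if_lt_eq_min, if_gt_eq_max, if_gt_eq_max]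

-- ===== VERDICT (by name: the statement is the Claim_ definition above) =====
theorem get_xywh_spec : Claim_equal_get_xywh := by
  intro coordinates downsample _ hpre
  unfold Spec_get_xywh
  match coordinates with
  | [] => exact absurd rfl hpre
  | (px, py) :: t =>
      simp only [get_xywh, get_xywh_alt, List.map_cons,
        PySem.List.min?_id_cons, PySem.List.max?_id_cons, go_eq]
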